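-- pv_equiv track=rewrite | github.com/yixuantt/GAPrune | gaprune/model/utils.py | parse_sparsify_layers
-- ===== SOURCE A (Python) =====
-- from typing import cast, List, Dict, Union, Optional, Set, Tuple
--
-- def parse_sparsify_layers(sparsify_layers: List[str]) -> Set[str]:
--     """
--     Parse sparsify_layers argument and return set of parameter patterns to sparsify
--     """
--     layer_patterns = get_layer_type_patterns()
--     patterns_to_sparsify = set()
--
--     for layer_type in sparsify_layers:
--         if layer_type == 'all':
--             for key, patterns in layer_patterns.items():
--                 if key != 'final_norm':
--                     patterns_to_sparsify.update(patterns)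
--         elif layer_type == 'linear':
--             patterns_to_sparsify.update(layer_patterns['mlp'])
--             patterns_to_sparsify.update(layer_patterns['attention'])
--         elif layer_type in layer_patterns:
--             patterns_to_sparsify.update(layer_patterns[layer_type])
--         else:
--             logger.warning(f"Unknown layer type: {layer_type}")
--
--     return patterns_to_sparsify
--
-- def get_layer_type_patterns() -> Dict[str, List[str]]:
--     """
--     Define patterns for different layer types
--     """
--     return {
--         'mlp': ['gate_proj', 'up_proj', 'down_proj'],
--         'attention': ['q_proj', 'k_proj', 'v_proj', 'o_proj'],
--         'layernorm': ['input_layernorm', 'post_attention_layernorm', 'q_norm', 'k_norm'],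
--         'embed': ['embed_tokens'],
--         'final_norm': ['norm.weight'],
--
--         # Fine-grained MLP components
--         'mlp_gate': ['gate_proj'],
--         'mlp_up': ['up_proj'],
--         'mlp_down': ['down_proj'],
--
--         # Fine-grained attention components
--         'attn_q': ['q_proj'],
--         'attn_k': ['k_proj'],
--         'attn_v': ['v_proj'],
--         'attn_o': ['o_proj'],
--
--         # Fine-grained normalization components
--         'norm_input': ['input_layernorm'],
--         'norm_post_attn': ['post_attention_layernorm'],
--         'norm_qk': ['q_norm', 'k_norm'],
--     }
-- ===== SOURCE B (Python) =====
-- _LAYER_TABLE = """\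
-- all gate_proj up_proj down_proj q_proj k_proj v_proj o_proj input_layernorm post_attention_layernorm q_norm k_norm embed_tokens
-- linear gate_proj up_proj down_proj q_proj k_proj v_proj o_proj
-- mlp gate_proj up_proj down_proj
-- attention q_proj k_proj v_proj o_proj
-- layernorm input_layernorm post_attention_layernorm q_norm k_norm
-- embed embed_tokens
-- final_norm norm.weight
-- mlp_gate gate_proj
-- mlp_up up_proj
-- mlp_down down_proj
-- attn_q q_proj
-- attn_k k_proj
-- attn_v v_proj
-- attn_o o_proj
-- norm_input input_layernorm
-- norm_post_attn post_attention_layernorm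
-- norm_qk q_norm k_norm
-- """
--
--
-- def parse_sparsify_layers(sparsify_layers):
--     table = {}
--     for line in _LAYER_TABLE.splitlines():
--         words = line.split()
--         if words:
--             table[words[0]] = words[1:]
--     flat = []
--     for t in sparsify_layers:
--         if t in table:
--             flat.extend(table[t])
--         else:
--             logger.warning(f"Unknown layer type: {t}")
--     return set(flat)
-- ===== Notes on version B (the rewrite author's own statement) =====
-- stated objective: alternative
-- what changed: A's per-token if/elif chain over a dict-of-lists (inner loop for 'all', double update for 'linear', set maintained incrementally) is replaced by a flat text table parsed once into a token->patterns lookup (with explicit 'all' and 'linear' rows), a single flattening pass that concatenates the selected rows, and one final set(flat) dedup at the end.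
import Mathlib
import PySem

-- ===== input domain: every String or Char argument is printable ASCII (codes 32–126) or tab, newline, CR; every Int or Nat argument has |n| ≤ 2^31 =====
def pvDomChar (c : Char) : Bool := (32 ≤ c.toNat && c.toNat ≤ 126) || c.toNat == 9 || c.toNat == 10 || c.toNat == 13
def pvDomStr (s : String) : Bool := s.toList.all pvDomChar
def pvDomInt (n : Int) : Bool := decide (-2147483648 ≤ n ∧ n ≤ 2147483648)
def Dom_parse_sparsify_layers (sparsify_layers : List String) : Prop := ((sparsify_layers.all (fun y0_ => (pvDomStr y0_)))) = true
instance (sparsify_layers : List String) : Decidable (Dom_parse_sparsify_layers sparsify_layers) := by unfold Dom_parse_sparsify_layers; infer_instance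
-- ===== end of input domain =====

-- B replaces A's per-token if/elif chain over a dict-of-lists by a flat text table parsed once
-- into a lookup table (with 'all' and 'linear' as explicit rows), a flattening pass collecting
-- every selected pattern, and ONE final dedup set(flat) (objective: alternative decomposition).

-- ===== PORT A =====
def pvLayerPatterns : PySem.Dict String (List String) := PySem.Dict.mk [
  ("mlp", ["gate_proj", "up_proj", "down_proj"]),
  ("attention", ["q_proj", "k_proj", "v_proj", "o_proj"]),
  ("layernorm", ["input_layernorm", "post_attention_layernorm", "q_norm", "k_norm"]),
  ("embed", ["embed_tokens"]),
  ("final_norm", ["norm.weight"]),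
  ("mlp_gate", ["gate_proj"]),
  ("mlp_up", ["up_proj"]),
  ("mlp_down", ["down_proj"]),
  ("attn_q", ["q_proj"]),
  ("attn_k", ["k_proj"]),
  ("attn_v", ["v_proj"]),
  ("attn_o", ["o_proj"]),
  ("norm_input", ["input_layernorm"]),
  ("norm_post_attn", ["post_attention_layernorm"]),
  ("norm_qk", ["q_norm", "k_norm"])]

-- one iteration of A's for-loop (the else branch is Python's NameError on the undefined
-- 'logger': those inputs are excluded by Pre_, so the value returned there is never claimed)
def pvStepA (s : PySem.Set String) (t : String) : PySem.Set String :=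
  if t == "all" then
    pvLayerPatterns.items.foldl
      (fun s kv => if kv.1 != "final_norm" then PySem.Set.update s kv.2 else s) s
  else if t == "linear" then
    PySem.Set.update (PySem.Set.update s (pvLayerPatterns.getD "mlp" []))
      (pvLayerPatterns.getD "attention" [])
  else if pvLayerPatterns.contains t then
    PySem.Set.update s (pvLayerPatterns.getD t [])
  else s

def parse_sparsify_layers (sparsify_layers : List String) : List String :=
  sparsify_layers.foldl pvStepA PySem.Set.empty

-- ===== PORT B =====
-- Source B's _LAYER_TABLE: one line per accepted token, "token pattern pattern …"
def pvLayerTable : String :=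
  "all gate_proj up_proj down_proj q_proj k_proj v_proj o_proj input_layernorm post_attention_layernorm q_norm k_norm embed_tokens\nlinear gate_proj up_proj down_proj q_proj k_proj v_proj o_proj\nmlp gate_proj up_proj down_proj\nattention q_proj k_proj v_proj o_proj\nlayernorm input_layernorm post_attention_layernorm q_norm k_norm\nembed embed_tokens\nfinal_norm norm.weight\nmlp_gate gate_proj\nmlp_up up_proj\nmlp_down down_proj\nattn_q q_proj\nattn_k k_proj\nattn_v v_proj\nattn_o o_proj\nnorm_input input_layernorm\nnorm_post_attn post_attention_layernorm\nnorm_qk q_norm k_norm\n"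

-- the table-parsing loop of Source B: line → words; words[0] maps to words[1:]
def pvTableB : PySem.Dict String (List String) :=
  (PySem.Str.splitlines pvLayerTable).foldl
    (fun tbl line =>
      match PySem.Str.split₀ line with
      | [] => tbl
      | k :: ps => tbl.insert k ps)
    PySem.Dict.empty

-- Source B's main loop: flatten the selected pattern lists, then set(flat) once at the end
-- (unknown tokens hit Source B's 'logger.warning' line, the same NameError as A; excluded by Pre_)
def parse_sparsify_layers_alt (sparsify_layers : List String) : List String :=
  PySem.Set.ofList
    (sparsify_layers.foldl
      (fun flat t => if pvTableB.contains t then flat ++ pvTableB.getD t [] else flat) [])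

-- ===== PRECONDITION & SPEC =====
def pvKnownTokens : List String :=
  ["all", "linear", "mlp", "attention", "layernorm", "embed", "final_norm",
   "mlp_gate", "mlp_up", "mlp_down", "attn_q", "attn_k", "attn_v", "attn_o",
   "norm_input", "norm_post_attn", "norm_qk"]

-- Pre_ excludes inputs containing an unknown layer-type token: there the 'logger.warning(...)'
-- line (in A and B alike) raises NameError, 'logger' being undefined in the module.
def Pre_parse_sparsify_layers (sparsify_layers : List String) : Prop :=
  (sparsify_layers.all (fun t => pvKnownTokens.contains t)) = true
instance (sparsify_layers : List String) : Decidable (Pre_parse_sparsify_layers sparsify_layers) := by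
  unfold Pre_parse_sparsify_layers; infer_instance

def pvWitness_parse_sparsify_layers : List String := ["all", "linear", "mlp", "norm_qk"]

def Spec_parse_sparsify_layers (sparsify_layers : List String) (out : List String) : Prop :=
  out = parse_sparsify_layers_alt sparsify_layers
instance (sparsify_layers : List String) (out : List String) : Decidable (Spec_parse_sparsify_layers sparsify_layers out) := by
  unfold Spec_parse_sparsify_layers; infer_instance

-- ===== CLAIM (what is proved, stated in full; the proofs are below) =====
def Claim_equal_parse_sparsify_layers : Prop := ∀ (sparsify_layers : List String),
  Dom_parse_sparsify_layers sparsify_layers → Pre_parse_sparsify_layers sparsify_layers →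
  Spec_parse_sparsify_layers sparsify_layers (parse_sparsify_layers sparsify_layers)

-- ===== LEMMAS AND PROOFS =====

-- evaluated form of Source B's parsed table (proved once; keeps later `decide`s cheap)
def pvTableBLit : PySem.Dict String (List String) := PySem.Dict.mk [
  ("all", ["gate_proj", "up_proj", "down_proj", "q_proj", "k_proj", "v_proj", "o_proj", "input_layernorm", "post_attention_layernorm", "q_norm", "k_norm", "embed_tokens"]),
  ("linear", ["gate_proj", "up_proj", "down_proj", "q_proj", "k_proj", "v_proj", "o_proj"]),
  ("mlp", ["gate_proj", "up_proj", "down_proj"]),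
  ("attention", ["q_proj", "k_proj", "v_proj", "o_proj"]),
  ("layernorm", ["input_layernorm", "post_attention_layernorm", "q_norm", "k_norm"]),
  ("embed", ["embed_tokens"]),
  ("final_norm", ["norm.weight"]),
  ("mlp_gate", ["gate_proj"]),
  ("mlp_up", ["up_proj"]),
  ("mlp_down", ["down_proj"]),
  ("attn_q", ["q_proj"]),
  ("attn_k", ["k_proj"]),
  ("attn_v", ["v_proj"]),
  ("attn_o", ["o_proj"]),
  ("norm_input", ["input_layernorm"]),
  ("norm_post_attn", ["post_attention_layernorm"]),
  ("norm_qk", ["q_norm", "k_norm"])]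

set_option maxRecDepth 100000 in
set_option maxHeartbeats 2000000 in
theorem pvTableB_eval : pvTableB = pvTableBLit := by rfl

theorem pv_update_ofList (s : PySem.Set String) (L : List String) :
    PySem.Set.update s (PySem.Set.ofList L) = PySem.Set.update s L := by
  rw [PySem.Set.update_eq_append_filter, PySem.Set.update_eq_append_filter, PySem.Set.ofList_ofList]

theorem pv_upd_congr (s : PySem.Set String) {L M : List String}
    (h : PySem.Set.ofList L = PySem.Set.ofList M) :
    PySem.Set.update s L = PySem.Set.update s M := by
  rw [← pv_update_ofList s L, ← pv_update_ofList s M, h]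

-- A's inner 'all' loop, characterised symbolically
theorem pv_fold_all (l : List (String × List String)) (s : PySem.Set String) :
    l.foldl (fun s kv => if kv.1 != "final_norm" then PySem.Set.update s kv.2 else s) s
      = PySem.Set.update s
          ((l.filter (fun kv => kv.1 != "final_norm")).flatMap (fun kv => kv.2)) := by
  induction l generalizing s with
  | nil => simp [PySem.Set.update_nil]
  | cons kv l ih =>
    by_cases h : (kv.1 != "final_norm") = true
    · simp only [List.foldl_cons, List.filter_cons, h, if_pos, List.flatMap_cons,
        PySem.Set.update_append, ih]
    · simp only [List.foldl_cons, List.filter_cons, h, Bool.false_eq_true, ih]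
      simp

theorem pv_stepA_plain (t : String) (h1 : (t == "all") = false) (h2 : (t == "linear") = false)
    (h3 : pvLayerPatterns.contains t = true) (s : PySem.Set String) :
    pvStepA s t = PySem.Set.update s (pvLayerPatterns.getD t []) := by
  unfold pvStepA; rw [h1, h2, h3]; simp

theorem pv_stepA_all (s : PySem.Set String) :
    pvStepA s "all" = pvLayerPatterns.items.foldl
      (fun s kv => if kv.1 != "final_norm" then PySem.Set.update s kv.2 else s) s := by
  unfold pvStepA; rw [show (("all" : String) == "all") = true from by decide]; simp

theorem pv_stepA_linear (s : PySem.Set String) :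
    pvStepA s "linear" = PySem.Set.update s
      (pvLayerPatterns.getD "mlp" [] ++ pvLayerPatterns.getD "attention" []) := by
  unfold pvStepA
  rw [show (("linear" : String) == "all") = false from by decide,
      show (("linear" : String) == "linear") = true from by decide,
      PySem.Set.update_append]
  simp

theorem pv_contains_tableB (t : String) (ht : t ∈ pvKnownTokens) :
    pvTableB.contains t = true := by
  have h : pvKnownTokens.all (fun t => pvTableB.contains t) = true := by
    rw [pvTableB_eval]; decide
  rw [List.all_eq_true] at h
  simpa using h t ht

-- per known token: A's step is one Set.update with a list ofList-equal to B's table row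
theorem pv_stepA_eq_update_tableB (t : String) (ht : t ∈ pvKnownTokens) (s : PySem.Set String) :
    pvStepA s t = PySem.Set.update s (pvTableB.getD t []) := by
  simp only [pvKnownTokens, List.mem_cons, List.not_mem_nil, or_false] at ht
  rcases ht with rfl | rfl | rfl | rfl | rfl | rfl | rfl | rfl | rfl | rfl | rfl | rfl | rfl | rfl | rfl | rfl | rfl
  · rw [pv_stepA_all, pv_fold_all, pvTableB_eval]; exact pv_upd_congr s (by decide)
  · rw [pv_stepA_linear, pvTableB_eval]; exact pv_upd_congr s (by decide)
  all_goals
    rw [pv_stepA_plain _ (by decide) (by decide) (by decide), pvTableB_eval]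
    exact pv_upd_congr s (by decide)

-- Source B's flattening loop, shifted off its accumulator
theorem pv_flat_shift (xs : List String) : ∀ (acc : List String),
    xs.foldl (fun flat t => if pvTableB.contains t then flat ++ pvTableB.getD t [] else flat) acc
      = acc ++ xs.foldl (fun flat t => if pvTableB.contains t then flat ++ pvTableB.getD t [] else flat) [] := by
  induction xs with
  | nil => intro acc; rw [List.foldl_nil, List.foldl_nil, List.append_nil]
  | cons t xs ih =>
    intro acc
    rw [List.foldl_cons, List.foldl_cons]
    by_cases h : pvTableB.contains t = true
    · rw [if_pos h, if_pos h, List.nil_append, ih, ih (pvTableB.getD t []), List.append_assoc]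
    · rw [if_neg h, if_neg h]
      exact ih acc

-- main invariant: A's running set over xs = the previous set updated with B's flattened list
theorem pv_main (xs : List String) (hk : ∀ t ∈ xs, t ∈ pvKnownTokens) (s : PySem.Set String) :
    xs.foldl pvStepA s
      = PySem.Set.update s
          (xs.foldl (fun flat t => if pvTableB.contains t then flat ++ pvTableB.getD t [] else flat) []) := by
  induction xs generalizing s with
  | nil => simp [PySem.Set.update_nil]
  | cons t xs ih =>
    have ht : t ∈ pvKnownTokens := hk t (List.mem_cons_self ..)
    rw [List.foldl_cons, List.foldl_cons, pv_flat_shift,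
        if_pos (pv_contains_tableB t ht), List.nil_append, PySem.Set.update_append,
        ih (fun u hu => hk u (List.mem_cons_of_mem _ hu)), pv_stepA_eq_update_tableB t ht]

theorem pv_pre_mem {xs : List String} (h : Pre_parse_sparsify_layers xs) {t : String}
    (ht : t ∈ xs) : t ∈ pvKnownTokens := by
  unfold Pre_parse_sparsify_layers at h
  rw [List.all_eq_true] at h
  simpa using h t ht

-- ===== VERDICT (by name: the statement is the Claim_ definition above) =====
theorem parse_sparsify_layers_spec : Claim_equal_parse_sparsify_layers := by
  intro xs _ hpre
  unfold Spec_parse_sparsify_layers parse_sparsify_layers parse_sparsify_layers_alt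
  rw [pv_main xs (fun t ht => pv_pre_mem hpre ht) PySem.Set.empty,
      ← PySem.Set.update_nil_left]
  rfl
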